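-- pv_equiv track=rewrite | github.com/phuycke/Project-Euler | assignments/problem_26.py | largestCycle
-- ===== SOURCE A (Python) =====
-- def periodlength(number):
--
--     """Define the period length of the decimal expansion of a fraction."""
--
--     denominator = number
--     searching = True
--     power = 1
--
--     avoiding = [2, 4, 5, 8, 10]
--
--     for j in range(len(avoiding)):
--         if number % avoiding[j] == 0:
--             return 0
--
--     while searching:
--         if ((10 ** power) - 1) % denominator == 0:
--             return power
--         else:
--             power += 1
--
-- def largestCycle(limit):
--
--     """Find the number which has the largest returning cycle by dividing 1 through a certain number."""
--
--     cycle = 6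
--     number = 7
--
--     for nums in range(2, limit + 1):
--         if periodlength(nums) > cycle:
--             cycle = periodlength(nums)
--             number = nums
--
--     return [number, cycle]
-- ===== SOURCE B (Python) =====
-- def largestCycle(limit):
--     """Find the number which has the largest returning cycle by dividing 1 through a certain number."""
--     best_cycle = 6
--     best_number = 7
--     for n in range(2, limit + 1):
--         if n % 2 == 0 or n % 5 == 0:
--             continue
--         # multiplicative order of 10 mod n via a running remainder (small ints)
--         r = 10 % n
--         k = 1
--         while r != 1:
--             r = r * 10 % n
--             k += 1
--         if k > best_cycle:
--             best_cycle = k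
--             best_number = n
--     return [best_number, best_cycle]
-- ===== Notes on version B (the rewrite author's own statement) =====
-- stated objective: faster
-- what changed: B computes the period as the multiplicative order of ten modulo the candidate via a running remainder (small ints, one modular multiply per step) and skips the candidates sharing a factor with the base up front, instead of A's repeated bigint powers tested for divisibility (and A's double call to periodlength).
import Mathlib
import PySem

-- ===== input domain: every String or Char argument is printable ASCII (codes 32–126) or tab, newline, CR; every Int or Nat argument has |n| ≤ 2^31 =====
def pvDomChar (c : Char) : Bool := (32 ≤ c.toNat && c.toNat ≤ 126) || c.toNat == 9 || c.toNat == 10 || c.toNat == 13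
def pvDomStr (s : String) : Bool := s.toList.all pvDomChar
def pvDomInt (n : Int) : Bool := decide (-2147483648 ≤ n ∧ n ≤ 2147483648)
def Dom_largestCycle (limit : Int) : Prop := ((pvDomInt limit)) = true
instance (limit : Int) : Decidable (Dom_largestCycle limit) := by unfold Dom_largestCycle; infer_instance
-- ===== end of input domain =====

-- B replaces A's bigint divisibility test of huge powers by a running remainder (the
-- multiplicative order of ten modulo the candidate), skipping candidates that share a
-- factor with the base up front: same result, measurably faster.


-- ===== PORT A =====
-- A's unbounded 'while searching' loop, with fuel as a totality guard only (the loop is only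
-- entered for denominators coprime to 10, where it terminates within 'denominator' steps).
def pyWhileA (denominator : Int) : Nat → Int → Int
  | 0, _ => 0
  | fuel + 1, power =>
    if PySem.Int.mod ((10 : Int) ^ power.toNat - 1) denominator = 0 then power
    else pyWhileA denominator fuel (power + 1)

def periodLengthA (number : Int) : Int :=
  if ([2, 4, 5, 8, 10] : List Int).any (fun a => PySem.Int.mod number a == 0) then 0
  else pyWhileA number number.toNat 1

def largestCycle (limit : Int) : List Int :=
  let res := (PySem.List.pyRange 2 (limit + 1) 1).foldl
    (fun (s : Int × Int) nums =>
      if periodLengthA nums > s.1 then (periodLengthA nums, nums) else s)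
    (6, 7)
  [res.2, res.1]

-- ===== PORT B =====
-- B's 'while r != 1' running-remainder loop, same fuel guard (unreachable on admitted inputs).
def orderLoopB (n : Int) : Nat → Int → Int → Int
  | 0, _, _ => 0
  | fuel + 1, r, k =>
    if r = 1 then k else orderLoopB n fuel (PySem.Int.mod (r * 10) n) (k + 1)

def largestCycle_alt (limit : Int) : List Int :=
  let res := (PySem.List.pyRange 2 (limit + 1) 1).foldl
    (fun (s : Int × Int) n =>
      if PySem.Int.mod n 2 = 0 ∨ PySem.Int.mod n 5 = 0 then s
      else
        let k := orderLoopB n n.toNat (PySem.Int.mod 10 n) 1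
        if k > s.1 then (k, n) else s)
    (6, 7)
  [res.2, res.1]

-- ===== PRECONDITION & SPEC =====
def Spec_largestCycle (limit : Int) (out : List Int) : Prop := out = largestCycle_alt limit
instance (limit : Int) (out : List Int) : Decidable (Spec_largestCycle limit out) := by unfold Spec_largestCycle; infer_instance

-- ===== CLAIM (what is proved, stated in full; the proofs are below) =====
def Claim_equal_largestCycle : Prop := ∀ (limit : Int), Dom_largestCycle limit → Spec_largestCycle limit (largestCycle limit)

-- ===== LEMMAS AND PROOFS =====

-- 1 % n = 1 for n ≥ 2, and the divisibility bridge (a-1) % n = 0 ↔ a % n = 1.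
lemma sub_one_emod_iff (a n : Int) (hn : 3 ≤ n) : (a - 1) % n = 0 ↔ a % n = 1 := by
  have h1 : (1 : Int) % n = 1 := Int.emod_eq_of_lt (by omega) (by omega)
  rw [Int.sub_emod, h1]
  have hr0 : 0 ≤ a % n := Int.emod_nonneg a (by omega)
  have hrn : a % n < n := Int.emod_lt_of_pos a (by omega)
  rcases eq_or_ne (a % n) 1 with h | h
  · simp [h]
  · constructor
    · intro hz
      rcases eq_or_ne (a % n) 0 with h0 | h0
      · rw [h0] at hz
        have hneg : (0 - 1 : Int) % n = n - 1 := by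
          rw [show (0 - 1 : Int) = (n - 1) + n * (-1) by ring, Int.add_mul_emod_self_left]
          exact Int.emod_eq_of_lt (by omega) (by omega)
        omega
      · have heq : (a % n - 1) % n = a % n - 1 := Int.emod_eq_of_lt (by omega) (by omega)
        omega
    · intro h1'; exact absurd h1' h

-- The two inner loops agree step for step: invariant r = 10 ^ p % n.
lemma loop_eq (fuel : Nat) (n : Int) (hn : 3 ≤ n) :
    ∀ p : Int, 1 ≤ p → pyWhileA n fuel p = orderLoopB n fuel ((10 : Int) ^ p.toNat % n) p := by
  induction fuel with
  | zero => intro p _; rfl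
  | succ fuel ih =>
    intro p hp
    have hmod : PySem.Int.mod ((10 : Int) ^ p.toNat - 1) n = ((10 : Int) ^ p.toNat - 1) % n :=
      PySem.Int.mod_eq_emod_of_pos (by omega)
    simp only [pyWhileA, orderLoopB, hmod]
    by_cases h : ((10 : Int) ^ p.toNat - 1) % n = 0
    · rw [if_pos h, if_pos ((sub_one_emod_iff _ n hn).mp h)]
    · rw [if_neg h, if_neg (fun he => h ((sub_one_emod_iff _ n hn).mpr he))]
      rw [ih (p + 1) (by omega)]
      congr 1
      · rw [PySem.Int.mod_eq_emod_of_pos (by omega)]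
        have ht : (p + 1).toNat = p.toNat + 1 := by omega
        rw [ht, pow_succ]
        rw [Int.mul_emod ((10 : Int) ^ p.toNat % n) 10 n,
            Int.emod_emod_of_dvd _ (dvd_refl n), ← Int.mul_emod]

-- A's avoiding-list test is exactly "divisible by 2 or by 5".
lemma filter_eq (n : Int) :
    (([2, 4, 5, 8, 10] : List Int).any (fun a => PySem.Int.mod n a == 0) = true)
      ↔ (PySem.Int.mod n 2 = 0 ∨ PySem.Int.mod n 5 = 0) := by
  simp only [List.any_cons, List.any_nil, Bool.or_eq_true, Bool.or_false, beq_iff_eq]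
  rw [PySem.Int.mod_eq_emod_of_pos (a := n) (b := 2) (by omega),
      PySem.Int.mod_eq_emod_of_pos (a := n) (b := 4) (by omega),
      PySem.Int.mod_eq_emod_of_pos (a := n) (b := 5) (by omega),
      PySem.Int.mod_eq_emod_of_pos (a := n) (b := 8) (by omega),
      PySem.Int.mod_eq_emod_of_pos (a := n) (b := 10) (by omega)]
  omega

-- One step of the two folds agrees on states with a nonnegative best cycle.
lemma step_eq (n : Int) (hn : 2 ≤ n) (s : Int × Int) (hs : 0 ≤ s.1) :
    (if periodLengthA n > s.1 then (periodLengthA n, n) else s)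
      = (if PySem.Int.mod n 2 = 0 ∨ PySem.Int.mod n 5 = 0 then s
         else
           let k := orderLoopB n n.toNat (PySem.Int.mod 10 n) 1
           if k > s.1 then (k, n) else s) := by
  by_cases hf : PySem.Int.mod n 2 = 0 ∨ PySem.Int.mod n 5 = 0
  · have hA : periodLengthA n = 0 := by
      unfold periodLengthA
      rw [if_pos ((filter_eq n).mpr hf)]
    rw [hA, if_pos hf, if_neg (by omega)]
  · have hn3 : 3 ≤ n := by
      rcases lt_or_ge n 3 with h | h
      · exfalso; apply hf
        have : n = 2 := by omega
        subst this; left; decide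
      · exact h
    have hany : (([2, 4, 5, 8, 10] : List Int).any (fun a => PySem.Int.mod n a == 0)) = false := by
      cases h : (([2, 4, 5, 8, 10] : List Int).any (fun a => PySem.Int.mod n a == 0)) with
      | false => rfl
      | true => exact absurd ((filter_eq n).mp h) hf
    have hA : periodLengthA n = orderLoopB n n.toNat (PySem.Int.mod 10 n) 1 := by
      unfold periodLengthA
      rw [hany]
      have h101 : PySem.Int.mod 10 n = (10 : Int) ^ (1 : Int).toNat % n := by
        rw [PySem.Int.mod_eq_emod_of_pos (by omega)]; norm_num
      rw [if_neg (by simp), h101, loop_eq n.toNat n hn3 1 (by omega)]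
    rw [if_neg hf, hA]
  -- the state invariant is re-established implicitly: any stored cycle is > s.1 ≥ 0

-- The folds agree on any list of numbers ≥ 2, from any state with nonnegative best cycle.
lemma fold_eq (l : List Int) :
    ∀ s : Int × Int, (∀ n ∈ l, 2 ≤ n) → 0 ≤ s.1 →
      l.foldl (fun (s : Int × Int) nums =>
          if periodLengthA nums > s.1 then (periodLengthA nums, nums) else s) s
        = l.foldl (fun (s : Int × Int) n =>
            if PySem.Int.mod n 2 = 0 ∨ PySem.Int.mod n 5 = 0 then s
            else
              let k := orderLoopB n n.toNat (PySem.Int.mod 10 n) 1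
              if k > s.1 then (k, n) else s) s := by
  induction l with
  | nil => intro s _ _; rfl
  | cons a l ih =>
    intro s hmem hs
    have ha : 2 ≤ a := hmem a (List.mem_cons_self ..)
    simp only [List.foldl_cons]
    rw [← step_eq a ha s hs]
    apply ih
    · exact fun n hn => hmem n (List.mem_cons_of_mem _ hn)
    · by_cases h : periodLengthA a > s.1
      · rw [if_pos h]; exact le_of_lt (lt_of_le_of_lt hs h)
      · rw [if_neg h]; exact hs

-- ===== VERDICT (by name: the statement is the Claim_ definition above) =====
theorem largestCycle_spec : Claim_equal_largestCycle := by
  intro limit _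
  unfold Spec_largestCycle largestCycle largestCycle_alt
  rw [fold_eq _ _ (fun n hn => ((PySem.List.mem_pyRange_one).mp hn).1) (by norm_num)]
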